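-- pv_equiv track=rewrite | github.com/Szymon-Budziak/Algorithms_and_Data_Structures_course_AGH | Colloquiums/2015-2016/Colloquium_2/Exercise_1.py | knights_moves
-- ===== SOURCE A (Python) =====
-- def dfs(graph, T, u):
--     T[u[0]][u[1]] = 0
--     for v in graph[u[0]][u[1]]:
--         if T[v[0]][v[1]] == 1:
--             dfs(graph, T, v)
--
-- def possible_moves(T, graph, x, y):
--     new_x = [x + 2, x + 1, x - 1, x - 2, x - 2, x - 1, x + 1, x + 2]
--     new_y = [y + 1, y + 2, y + 2, y + 1, y - 1, y - 2, y - 2, y - 1]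
--     for i in range(len(new_x)):
--         if new_x[i] >= 0 and new_y[i] >= 0 and new_x[i] < len(T) and new_y[i] < len(T):
--             if T[new_x[i]][new_y[i]] == 1:
--                 graph[x][y].append((new_x[i], new_y[i]))
--
-- def knights_moves(T):
--     graph = [[[] for _ in range(len(T))] for _ in range(len(T))]
--     for i in range(len(T)):
--         for j in range(len(T)):
--             if T[i][j] == 1:
--                 possible_moves(T, graph, i, j)
--     dfs(graph, T, (0, 0))
--     for i in range(len(T)):
--         for j in range(len(T)):
--             if T[i][j] == 1:
--                 return False
--     return True
-- ===== SOURCE B (Python) =====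
-- # Iterative flood fill with an explicit stack (mark-on-push), neighbours computed
-- # on the fly; no adjacency lists are built.  Like A it mutates T in place (A also
-- # zeroes T[0][0] even when it is not 1; B only zeroes cells whose value is 1 --
-- # the RETURN value is identical).
-- _OFFS = [(2, 1), (1, 2), (-1, 2), (-2, 1), (-2, -1), (-1, -2), (1, -2), (2, -1)]
--
-- def knights_moves(T):
--     n = len(T)
--     if n != 0 and T[0][0] == 1:
--         T[0][0] = 0
--         stack = [(0, 0)]
--         while stack:
--             x, y = stack.pop()
--             for dx, dy in _OFFS:
--                 nx, ny = x + dx, y + dy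
--                 if 0 <= nx < n and 0 <= ny < n and T[nx][ny] == 1:
--                     T[nx][ny] = 0
--                     stack.append((nx, ny))
--     return all(T[i][j] != 1 for i in range(n) for j in range(n))
-- ===== Notes on version B (the rewrite author's own statement) =====
-- stated objective: faster
-- what changed: A builds an n*n array of adjacency lists with a nested scan and then runs a recursive marking DFS over it; B does an explicit-stack flood fill from (0,0), computing the 8 knight neighbours on the fly, with no adjacency structure at all.
-- outside the precondition, e.g. on knights_moves([]): A raises IndexError, B returns True; on knights_moves([[1, 1], [1]]): A raises IndexError, B returns False
import Mathlib
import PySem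

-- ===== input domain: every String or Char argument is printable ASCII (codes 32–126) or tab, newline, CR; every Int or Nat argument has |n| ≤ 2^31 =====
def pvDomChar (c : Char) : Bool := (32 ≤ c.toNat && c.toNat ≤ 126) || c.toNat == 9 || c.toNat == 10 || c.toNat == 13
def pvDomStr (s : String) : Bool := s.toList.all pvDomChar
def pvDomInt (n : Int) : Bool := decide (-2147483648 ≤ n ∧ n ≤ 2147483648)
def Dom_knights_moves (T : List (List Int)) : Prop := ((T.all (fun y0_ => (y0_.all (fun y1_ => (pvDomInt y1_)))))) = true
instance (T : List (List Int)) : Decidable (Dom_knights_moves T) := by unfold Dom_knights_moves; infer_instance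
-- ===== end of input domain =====

-- B replaces A's precomputed adjacency lists + recursive DFS by an explicit-stack
-- flood fill computing knight neighbours on the fly (alternative decomposition).
-- Both Pythons mutate T in place; the equivalence proved here is about the RETURN value.

-- ===== PORT A =====

/-- `T[i][j]` read with Python indexing; the `.getD` defaults are never reached at the
    call sites admitted by `Pre_knights_moves` (all indices are bounds-checked or in-range). -/
def pvVal (T : List (List Int)) (i j : Int) : Int :=
  (PySem.List.pyGet? ((PySem.List.pyGet? T i).getD []) j).getD 0

/-- `T[i][j] = 0` (in the ports the grid is threaded functionally); call sites only use
    non-negative indices, and `List.set` out of range is a no-op exactly where Python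
    would raise (excluded by `Pre_knights_moves`). -/
def pvSet0 (T : List (List Int)) (i j : Int) : List (List Int) :=
  T.set i.toNat ((T.getD i.toNat []).set j.toNat 0)

/-- `graph[x][y]` -/
def pvGraphAt (g : List (List (List (Int × Int)))) (x y : Int) : List (Int × Int) :=
  (g.getD x.toNat []).getD y.toNat []

/-- `graph[x][y].append(v)` -/
def pvGraphApp (g : List (List (List (Int × Int)))) (x y : Int) (v : Int × Int) :
    List (List (List (Int × Int))) :=
  g.set x.toNat ((g.getD x.toNat []).set y.toNat (pvGraphAt g x y ++ [v]))

/-- `possible_moves(T, graph, x, y)` -/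
def possibleMoves (T : List (List Int)) (g : List (List (List (Int × Int)))) (x y : Int) :
    List (List (List (Int × Int))) :=
  let new_x := [x + 2, x + 1, x - 1, x - 2, x - 2, x - 1, x + 1, x + 2]
  let new_y := [y + 1, y + 2, y + 2, y + 1, y - 1, y - 2, y - 2, y - 1]
  (List.range new_x.length).foldl (fun g i =>
    let nx := new_x.getD i 0
    let ny := new_y.getD i 0
    if nx ≥ 0 ∧ ny ≥ 0 ∧ nx < (T.length : Int) ∧ ny < (T.length : Int) then
      if pvVal T nx ny = 1 then pvGraphApp g x y (nx, ny) else g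
    else g) g

/-- `dfs(graph, T, u)`.  The fuel only bounds the recursion DEPTH (Python recursion needs
    no fuel); depth is at most the number of `1`-cells plus one, so the `n*n+1` fuel
    `knights_moves` passes is never exhausted (this is proved, not assumed, below). -/
def dfsA (g : List (List (List (Int × Int)))) :
    Nat → List (List Int) → Int × Int → List (List Int)
  | 0, T, _ => T
  | f + 1, T, u =>
    (pvGraphAt g u.1 u.2).foldl
      (fun T v => if pvVal T v.1 v.2 = 1 then dfsA g f T v else T)
      (pvSet0 T u.1 u.2)

def knights_moves (T : List (List Int)) : Bool :=
  let n := T.length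
  let g0 : List (List (List (Int × Int))) :=
    (List.range n).map (fun _ => (List.range n).map (fun _ => ([] : List (Int × Int))))
  let g := (List.range n).foldl (fun g (i : Nat) =>
    (List.range n).foldl (fun g (j : Nat) =>
      if pvVal T (i : Int) (j : Int) = 1 then possibleMoves T g (i : Int) (j : Int) else g) g) g0
  let T' := dfsA g (n * n + 1) T (0, 0)
  !((List.range n).any (fun i => (List.range n).any (fun j => pvVal T' (i : Int) (j : Int) == 1)))

-- ===== PORT B =====

/-- the 8 knight offsets of Source B (`_OFFS`) -/
def pvOffs : List (Int × Int) :=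
  [(2, 1), (1, 2), (-1, 2), (-2, 1), (-2, -1), (-1, -2), (1, -2), (2, -1)]

/-- total number of `1` entries in the grid (termination measure only) -/
def pvOnesAll (T : List (List Int)) : Nat := (T.map (fun r => r.count 1)).sum

/-- one offset step of Source B's inner `for` loop -/
def pvStepB (n x y : Int) (p : List (List Int) × List (Int × Int)) (d : Int × Int) :
    List (List Int) × List (Int × Int) :=
  if 0 ≤ x + d.1 ∧ x + d.1 < n ∧ 0 ≤ y + d.2 ∧ y + d.2 < n ∧ pvVal p.1 (x + d.1) (y + d.2) = 1 then
    (pvSet0 p.1 (x + d.1) (y + d.2), (x + d.1, y + d.2) :: p.2)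
  else p

theorem sum_set_lt (l : List Nat) (k a : Nat) (hk : k < l.length) (ha : a < l[k]) :
    (l.set k a).sum < l.sum := by
  induction l generalizing k with
  | nil => simp at hk
  | cons x xs ih =>
    cases k with
    | zero => simpa using by simp at ha; omega
    | succ k =>
      simp only [List.set_cons_succ, List.sum_cons]
      have := ih k (by simpa using hk) (by simpa using ha)
      omega

theorem count_set_lt (r : List Int) (j : Nat) (hj : j < r.length) (h : r[j] = 1) :
    (r.set j 0).count 1 < r.count 1 := by
  induction r generalizing j with
  | nil => simp at hj
  | cons x xs ih =>
    cases j with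
    | zero => simp_all
    | succ j =>
      simp only [List.set_cons_succ, List.count_cons]
      have := ih j (by simpa using hj) (by simpa using h)
      omega

theorem pvVal_one_valid (T : List (List Int)) (i j : Int) (hi : 0 ≤ i) (hj : 0 ≤ j)
    (h : pvVal T i j = 1) :
    ∃ (hit : i.toNat < T.length), ∃ (hjt : j.toNat < T[i.toNat].length),
      T[i.toNat][j.toNat] = 1 := by
  unfold pvVal at h
  rw [PySem.List.pyGet?_of_nonneg T hi] at h
  rcases hT : T[i.toNat]? with _ | r
  · rw [hT] at h; simp [PySem.List.pyGet?] at h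
  · rw [hT] at h
    simp only [Option.getD_some] at h
    rw [PySem.List.pyGet?_of_nonneg r hj] at h
    rcases hr : r[j.toNat]? with _ | v
    · rw [hr] at h; simp at h
    · rw [hr] at h
      simp only [Option.getD_some] at h
      have hit : i.toNat < T.length := by
        by_contra hc
        simp [List.getElem?_eq_none (le_of_not_gt hc)] at hT
      have hTe : T[i.toNat] = r := by
        have := List.getElem?_eq_getElem hit (l := T); rw [hT] at this
        injection this with h2; exact h2.symm
      subst h
      have hjt : j.toNat < r.length := by
        by_contra hc
        simp [List.getElem?_eq_none (le_of_not_gt hc)] at hr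
      refine ⟨hit, by rw [hTe]; exact hjt, ?_⟩
      have := List.getElem?_eq_getElem hjt (l := r); rw [hr] at this
      injection this with h2
      simp [hTe]
      exact h2.symm

theorem pvOnesAll_set0_lt (T : List (List Int)) (i j : Int)
    (hi : 0 ≤ i) (hj : 0 ≤ j) (h1 : pvVal T i j = 1) :
    pvOnesAll (pvSet0 T i j) < pvOnesAll T := by
  obtain ⟨hit, hjt, h1e⟩ := pvVal_one_valid T i j hi hj h1
  unfold pvOnesAll pvSet0
  rw [List.map_set]
  apply sum_set_lt
  case hk => simpa using hit
  case ha =>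
    rw [List.getD_eq_getElem T [] hit, List.getElem_map]
    exact count_set_lt T[i.toNat] j.toNat hjt h1e

theorem pvStepB_measure (n x y : Int) (p : List (List Int) × List (Int × Int)) (d : Int × Int) :
    pvOnesAll (pvStepB n x y p d).1 + (pvStepB n x y p d).2.length ≤
      pvOnesAll p.1 + p.2.length := by
  unfold pvStepB
  split
  · rename_i h
    have := pvOnesAll_set0_lt p.1 (x + d.1) (y + d.2) h.1 h.2.2.1 h.2.2.2.2
    simp only [List.length_cons]
    omega
  · omega

theorem pvFoldB_measure (n x y : Int) (L : List (Int × Int))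
    (p : List (List Int) × List (Int × Int)) :
    pvOnesAll (L.foldl (pvStepB n x y) p).1 + (L.foldl (pvStepB n x y) p).2.length ≤
      pvOnesAll p.1 + p.2.length := by
  induction L generalizing p with
  | nil => simp
  | cons d L ih =>
    simp only [List.foldl_cons]
    exact le_trans (ih (pvStepB n x y p d)) (pvStepB_measure n x y p d)

/-- Source B's `while stack:` loop; the Lean list's head is the top of Python's stack. -/
def loopB (n : Int) : List (List Int) → List (Int × Int) → List (List Int)
  | T, [] => T
  | T, (x, y) :: rest =>
    let s := pvOffs.foldl (pvStepB n x y) (T, rest)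
    loopB n s.1 s.2
termination_by T st => pvOnesAll T + st.length
decreasing_by
  have := pvFoldB_measure n x y pvOffs (T, rest)
  simp only [List.length_cons] at *
  omega

def knights_moves_alt (T : List (List Int)) : Bool :=
  let n := T.length
  let T' := if n ≠ 0 ∧ pvVal T 0 0 = 1 then loopB (n : Int) (pvSet0 T 0 0) [(0, 0)] else T
  (List.range n).all (fun i => (List.range n).all (fun j => pvVal T' (i : Int) (j : Int) != 1))

-- ===== PRECONDITION & SPEC =====

/-- Exactly the inputs on which the Python A returns: on an empty grid or one with a row
    shorter than `len(T)` A hits an IndexError (it reads every `T[i][j]`, `i, j < len(T)`). -/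
def Pre_knights_moves (T : List (List Int)) : Prop :=
  T ≠ [] ∧ ∀ r ∈ T, T.length ≤ r.length

instance (T : List (List Int)) : Decidable (Pre_knights_moves T) := by
  unfold Pre_knights_moves; infer_instance

def pvWitness_knights_moves : List (List Int) := [[1, 0], [0, 1]]

def Spec_knights_moves (T : List (List Int)) (out : Bool) : Prop := out = knights_moves_alt T
instance (T : List (List Int)) (out : Bool) : Decidable (Spec_knights_moves T out) := by
  unfold Spec_knights_moves; infer_instance

-- ===== CLAIM (what is proved, stated in full; the proofs are below) =====
def Claim_equal_knights_moves : Prop :=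
  ∀ (T : List (List Int)), Dom_knights_moves T → Pre_knights_moves T →
    Spec_knights_moves T (knights_moves T)

-- ===== LEMMAS AND PROOFS =====

-- Reachability relation shared by the two correctness arguments ---------------

/-- cell inside the `n × n` board -/
abbrev pvInb (n : Nat) (p : Int × Int) : Prop :=
  0 ≤ p.1 ∧ p.1 < (n : Int) ∧ 0 ≤ p.2 ∧ p.2 < (n : Int)

/-- one knight step between two `1`-cells of the original grid -/
def pvEdge (T0 : List (List Int)) (u v : Int × Int) : Prop :=
  pvInb T0.length u ∧ pvInb T0.length v ∧ (v.1 - u.1, v.2 - u.2) ∈ pvOffs ∧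
    pvVal T0 u.1 u.2 = 1 ∧ pvVal T0 v.1 v.2 = 1

/-- reachable from the corner through `1`-cells -/
def pvRch (T0 : List (List Int)) (c : Int × Int) : Prop :=
  Relation.ReflTransGen (pvEdge T0) (0, 0) c

-- Grid update characterisation --------------------------------------------------

abbrev pvValid (T : List (List Int)) (i j : Int) : Prop :=
  0 ≤ i ∧ 0 ≤ j ∧ i.toNat < T.length ∧ j.toNat < (T.getD i.toNat []).length

theorem pvValid_of_val_one (T : List (List Int)) (i j : Int)
    (hi : 0 ≤ i) (hj : 0 ≤ j) (h : pvVal T i j = 1) : pvValid T i j := by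
  obtain ⟨hit, hjt, _⟩ := pvVal_one_valid T i j hi hj h
  exact ⟨hi, hj, hit, by rwa [List.getD_eq_getElem T [] hit]⟩

theorem pvVal_set0 (T : List (List Int)) (i j a b : Int)
    (hi : 0 ≤ i) (hj : 0 ≤ j) (ha : 0 ≤ a) (hb : 0 ≤ b) :
    pvVal (pvSet0 T i j) a b =
      if a = i ∧ b = j ∧ pvValid T i j then 0 else pvVal T a b := by
  unfold pvVal pvSet0
  rw [PySem.List.pyGet?_of_nonneg T ha, PySem.List.pyGet?_of_nonneg _ ha]
  by_cases hai : i.toNat = a.toNat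
  · rw [List.getElem?_set, if_pos hai]
    by_cases hlen : i.toNat < T.length
    · rw [if_pos hlen]
      simp only [Option.getD_some]
      have hTa : T[a.toNat]? = some (T.getD i.toNat []) := by
        rw [← hai, List.getD_eq_getElem T [] hlen, List.getElem?_eq_getElem hlen]
      rw [hTa]
      simp only [Option.getD_some]
      rw [PySem.List.pyGet?_of_nonneg _ hb, PySem.List.pyGet?_of_nonneg _ hb]
      by_cases hbj : j.toNat = b.toNat
      · rw [List.getElem?_set, if_pos hbj]
        by_cases hrl : j.toNat < (T.getD i.toNat []).length
        · rw [if_pos hrl]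
          have : a = i ∧ b = j ∧ pvValid T i j := by
            refine ⟨by omega, by omega, hi, hj, hlen, hrl⟩
          rw [if_pos this]; rfl
        · rw [if_neg hrl]
          have hnot : ¬ (a = i ∧ b = j ∧ pvValid T i j) := by
            rintro ⟨_, _, _, _, _, h4⟩; exact hrl h4
          rw [if_neg hnot]
          rw [List.getElem?_eq_none (by omega)]
      · rw [List.getElem?_set, if_neg hbj]
        have hnot : ¬ (a = i ∧ b = j ∧ pvValid T i j) := by
          rintro ⟨h1, h2, _⟩; omega
        rw [if_neg hnot]
    · rw [if_neg hlen]
      have hnot : ¬ (a = i ∧ b = j ∧ pvValid T i j) := by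
        rintro ⟨_, _, _, _, h3, _⟩; exact hlen h3
      rw [if_neg hnot, List.getElem?_eq_none (by omega)]
  · rw [List.getElem?_set, if_neg hai]
    have hnot : ¬ (a = i ∧ b = j ∧ pvValid T i j) := by
      rintro ⟨h1, _⟩; omega
    rw [if_neg hnot]

/-- number of `1`-cells inside the `n × n` region (fuel/measure for the A-side proof) -/
def pvOnesR (n : Nat) (T : List (List Int)) : Nat :=
  ((Finset.range n ×ˢ Finset.range n).filter
    (fun p => pvVal T (p.1 : Int) (p.2 : Int) = 1)).card

theorem pvOnesR_le (n : Nat) (T : List (List Int)) : pvOnesR n T ≤ n * n := by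
  unfold pvOnesR
  calc _ ≤ (Finset.range n ×ˢ Finset.range n).card := Finset.card_filter_le _ _
    _ = n * n := by simp [Finset.card_product]

theorem pvOnesR_mono (n : Nat) (T T' : List (List Int))
    (h : ∀ a b : Int, 0 ≤ a → 0 ≤ b → pvVal T' a b = 1 → pvVal T a b = 1) :
    pvOnesR n T' ≤ pvOnesR n T := by
  apply Finset.card_le_card
  intro p hp
  simp only [Finset.mem_filter] at *
  exact ⟨hp.1, h _ _ (by positivity) (by positivity) hp.2⟩

theorem pvOnesR_set0_lt (n : Nat) (T : List (List Int)) (i j : Int)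
    (hin : pvInb n (i, j)) (h1 : pvVal T i j = 1) :
    pvOnesR n (pvSet0 T i j) < pvOnesR n T := by
  obtain ⟨hi, hiN, hj, hjN⟩ := hin
  have hv := pvValid_of_val_one T i j hi hj h1
  apply Finset.card_lt_card
  constructor
  · intro p hp
    simp only [Finset.mem_filter] at *
    refine ⟨hp.1, ?_⟩
    have := hp.2
    rw [pvVal_set0 T i j _ _ hi hj (by positivity) (by positivity)] at this
    split at this
    · exact absurd this (by norm_num)
    · exact this
  · intro hsub
    have hmem : ((i.toNat, j.toNat) : Nat × Nat) ∈
        (Finset.range n ×ˢ Finset.range n).filter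
          (fun p => pvVal T (p.1 : Int) (p.2 : Int) = 1) := by
      simp only [Finset.mem_filter, Finset.mem_product, Finset.mem_range]
      refine ⟨⟨by omega, by omega⟩, ?_⟩
      rw [Int.toNat_of_nonneg hi, Int.toNat_of_nonneg hj]
      exact h1
    have := hsub hmem
    simp only [Finset.mem_filter] at this
    have h0 := this.2
    rw [Int.toNat_of_nonneg hi, Int.toNat_of_nonneg hj] at h0
    rw [pvVal_set0 T i j i j hi hj hi hj, if_pos ⟨rfl, rfl, hv⟩] at h0
    norm_num at h0

-- A-side: characterisation of the built graph -----------------------------------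

/-- the adjacency list `possible_moves` produces for a `1`-cell `(x, y)` -/
def pvNbrs (T0 : List (List Int)) (x y : Int) : List (Int × Int) :=
  (pvOffs.map (fun d => (x + d.1, y + d.2))).filter
    (fun v => decide (v.1 ≥ 0 ∧ v.2 ≥ 0 ∧ v.1 < (T0.length : Int) ∧ v.2 < (T0.length : Int)) &&
      (pvVal T0 v.1 v.2 == 1))

/-- what the adjacency structure built by `knights_moves` looks like -/
def pvGChar (T0 : List (List Int)) (g : List (List (List (Int × Int)))) : Prop :=
  ∀ a b : Int, 0 ≤ a → 0 ≤ b →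
    pvGraphAt g a b =
      if a < (T0.length : Int) ∧ b < (T0.length : Int) ∧ pvVal T0 a b = 1
      then pvNbrs T0 a b else []

def pvGShp (n : Nat) (g : List (List (List (Int × Int)))) : Prop :=
  g.length = n ∧ ∀ r ∈ g, r.length = n

theorem pvGraphAt_app (g : List (List (List (Int × Int)))) (x y a b : Int) (v : Int × Int)
    (hx : 0 ≤ x) (hy : 0 ≤ y) (ha : 0 ≤ a) (hb : 0 ≤ b)
    (hvx : x.toNat < g.length) (hvy : y.toNat < (g.getD x.toNat []).length) :
    pvGraphAt (pvGraphApp g x y v) a b =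
      if a = x ∧ b = y then pvGraphAt g x y ++ [v] else pvGraphAt g a b := by
  unfold pvGraphAt pvGraphApp
  simp only [List.getD_eq_getElem?_getD] at hvy ⊢
  by_cases hax : x.toNat = a.toNat
  · rw [hax] at hvx hvy ⊢
    rw [List.getElem?_set_self hvx]
    simp only [Option.getD_some]
    by_cases hby : y.toNat = b.toNat
    · rw [hby] at hvy ⊢
      rw [List.getElem?_set_self hvy]
      simp only [Option.getD_some]
      rw [if_pos ⟨by omega, by omega⟩]
      unfold pvGraphAt
      simp only [List.getD_eq_getElem?_getD]
      rw [hax, hby]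
    · rw [List.getElem?_set_ne hby, if_neg (by intro hcc; exact hby (by omega))]
  · rw [List.getElem?_set_ne hax, if_neg (by intro hcc; exact hax (by omega))]

theorem pvGShp_app (n : Nat) (g : List (List (List (Int × Int)))) (x y : Int) (v : Int × Int)
    (hg : pvGShp n g) : pvGShp n (pvGraphApp g x y v) := by
  obtain ⟨h1, h2⟩ := hg
  refine ⟨by simpa [pvGraphApp] using h1, ?_⟩
  intro r hr
  unfold pvGraphApp at hr
  by_cases hx : x.toNat < g.length
  · rcases List.mem_or_eq_of_mem_set hr with h | h
    · exact h2 r h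
    · rw [h, List.length_set]
      exact h2 _ (by rw [List.getD_eq_getElem?_getD, List.getElem?_eq_getElem hx]; simp)
  · rw [List.set_eq_of_length_le (by omega)] at hr
    exact h2 r hr

/-- `possible_moves` as a fold over the offset list -/
def pvPMStep (T0 : List (List Int)) (x y : Int) (g : List (List (List (Int × Int))))
    (d : Int × Int) : List (List (List (Int × Int))) :=
  if x + d.1 ≥ 0 ∧ y + d.2 ≥ 0 ∧ x + d.1 < (T0.length : Int) ∧ y + d.2 < (T0.length : Int) then
    if pvVal T0 (x + d.1) (y + d.2) = 1 then pvGraphApp g x y (x + d.1, y + d.2) else g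
  else g

set_option maxHeartbeats 2000000 in
theorem pvPM_eq (T0 : List (List Int)) (g : List (List (List (Int × Int)))) (x y : Int) :
    possibleMoves T0 g x y = pvOffs.foldl (pvPMStep T0 x y) g := by
  unfold possibleMoves pvOffs pvPMStep
  rfl

/-- per-offset content appended by `pvPMStep` -/
def pvNbrsL (T0 : List (List Int)) (x y : Int) (L : List (Int × Int)) : List (Int × Int) :=
  (L.map (fun d => (x + d.1, y + d.2))).filter
    (fun v => decide (v.1 ≥ 0 ∧ v.2 ≥ 0 ∧ v.1 < (T0.length : Int) ∧ v.2 < (T0.length : Int)) &&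
      (pvVal T0 v.1 v.2 == 1))

theorem pvFoldPM_at (T0 : List (List Int)) (n : Nat) (hn : n = T0.length) (x y : Int)
    (hx : 0 ≤ x) (hx2 : x < (n : Int)) (hy : 0 ≤ y) (hy2 : y < (n : Int)) :
    ∀ (L : List (Int × Int)) (g : List (List (List (Int × Int)))), pvGShp n g →
      pvGShp n (L.foldl (pvPMStep T0 x y) g) ∧
      ∀ a b : Int, 0 ≤ a → 0 ≤ b →
        pvGraphAt (L.foldl (pvPMStep T0 x y) g) a b =
          pvGraphAt g a b ++ (if a = x ∧ b = y then pvNbrsL T0 x y L else []) := by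
  intro L
  induction L with
  | nil =>
    intro g hg
    refine ⟨hg, fun a b _ _ => ?_⟩
    simp [pvNbrsL]
  | cons d L ih =>
    intro g hg
    obtain ⟨hgl, hgr⟩ := hg
    have hvx : x.toNat < g.length := by omega
    have hrow : (g.getD x.toNat []).length = n := by
      refine hgr _ ?_
      rw [List.getD_eq_getElem?_getD, List.getElem?_eq_getElem hvx]
      simp
    have hvy : y.toNat < (g.getD x.toNat []).length := by omega
    simp only [List.foldl_cons]
    have hnbrs : pvNbrsL T0 x y (d :: L) =
        (if ((x + d.1 ≥ 0 ∧ y + d.2 ≥ 0 ∧ x + d.1 < (T0.length : Int) ∧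
              y + d.2 < (T0.length : Int)) ∧ pvVal T0 (x + d.1) (y + d.2) = 1)
          then [(x + d.1, y + d.2)] else []) ++ pvNbrsL T0 x y L := by
      simp only [pvNbrsL, List.map_cons, List.filter_cons]
      by_cases hc : (x + d.1 ≥ 0 ∧ y + d.2 ≥ 0 ∧ x + d.1 < (T0.length : Int) ∧
          y + d.2 < (T0.length : Int)) ∧ pvVal T0 (x + d.1) (y + d.2) = 1
      · rw [if_pos hc]
        have : (decide (x + d.1 ≥ 0 ∧ y + d.2 ≥ 0 ∧ x + d.1 < (T0.length : Int) ∧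
            y + d.2 < (T0.length : Int)) && (pvVal T0 (x + d.1) (y + d.2) == 1)) = true := by
          simp only [Bool.and_eq_true, decide_eq_true_eq, beq_iff_eq]
          exact ⟨hc.1, hc.2⟩
        rw [this]
        simp
      · rw [if_neg hc]
        have : (decide (x + d.1 ≥ 0 ∧ y + d.2 ≥ 0 ∧ x + d.1 < (T0.length : Int) ∧
            y + d.2 < (T0.length : Int)) && (pvVal T0 (x + d.1) (y + d.2) == 1)) = false := by
          simp only [Bool.and_eq_false_iff, decide_eq_false_iff_not, beq_eq_false_iff_ne, ne_eq]
          by_cases h1 : x + d.1 ≥ 0 ∧ y + d.2 ≥ 0 ∧ x + d.1 < (T0.length : Int) ∧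
              y + d.2 < (T0.length : Int)
          · exact Or.inr (fun hv => hc ⟨h1, hv⟩)
          · exact Or.inl h1
        rw [this]
        simp
    by_cases hb : x + d.1 ≥ 0 ∧ y + d.2 ≥ 0 ∧ x + d.1 < (T0.length : Int) ∧
        y + d.2 < (T0.length : Int)
    · by_cases hv1 : pvVal T0 (x + d.1) (y + d.2) = 1
      · have hstep : pvPMStep T0 x y g d = pvGraphApp g x y (x + d.1, y + d.2) := by
          unfold pvPMStep; rw [if_pos hb, if_pos hv1]
        rw [hstep]
        obtain ⟨sh', char'⟩ := ih _ (pvGShp_app n g x y _ ⟨hgl, hgr⟩)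
        refine ⟨sh', ?_⟩
        intro a b ha hbn
        rw [char' a b ha hbn,
          pvGraphAt_app g x y a b _ (by omega) (by omega) ha hbn hvx hvy]
        by_cases hab : a = x ∧ b = y
        · obtain ⟨ha1, hb1⟩ := hab
          subst ha1; subst hb1
          simp only [and_self, if_true]
          rw [hnbrs, if_pos ⟨hb, hv1⟩, List.append_assoc]
        · simp only [if_neg hab]
      · have hstep : pvPMStep T0 x y g d = g := by
          unfold pvPMStep; rw [if_pos hb, if_neg hv1]
        rw [hstep, hnbrs, if_neg (fun hcc => hv1 hcc.2)]
        exact ih g ⟨hgl, hgr⟩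
    · have hstep : pvPMStep T0 x y g d = g := by
        unfold pvPMStep; rw [if_neg hb]
      rw [hstep, hnbrs, if_neg (fun hcc => hb hcc.1)]
      exact ih g ⟨hgl, hgr⟩

theorem pvNbrsL_offs (T0 : List (List Int)) (x y : Int) :
    pvNbrsL T0 x y pvOffs = pvNbrs T0 x y := rfl

theorem pvInner_char (T0 : List (List Int)) (n : Nat) (hn : n = T0.length)
    (i : Nat) (hi : i < n) :
    ∀ (m : Nat), m ≤ n → ∀ g, pvGShp n g →
      pvGShp n ((List.range m).foldl (fun g (j : Nat) =>
        if pvVal T0 (i : Int) (j : Int) = 1 then possibleMoves T0 g (i : Int) (j : Int) else g) g) ∧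
      ∀ a b : Int, 0 ≤ a → 0 ≤ b →
        pvGraphAt ((List.range m).foldl (fun g (j : Nat) =>
          if pvVal T0 (i : Int) (j : Int) = 1 then possibleMoves T0 g (i : Int) (j : Int) else g) g) a b =
          pvGraphAt g a b ++
            (if a = (i : Int) ∧ b < (m : Int) ∧ pvVal T0 a b = 1 then pvNbrs T0 a b else []) := by
  intro m
  induction m with
  | zero =>
    intro _ g hg
    refine ⟨by simpa using hg, fun a b ha hb => ?_⟩
    rw [if_neg (by rintro ⟨_, h2, _⟩; omega), List.range_zero, List.foldl_nil]
    simp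
  | succ m ihm =>
    intro hm g hg
    obtain ⟨sh_m, char_m⟩ := ihm (by omega) g hg
    rw [List.range_succ, List.foldl_append, List.foldl_cons, List.foldl_nil]
    by_cases hv : pvVal T0 (i : Int) (m : Int) = 1
    · rw [if_pos hv]
      rw [pvPM_eq]
      obtain ⟨sh', char'⟩ := pvFoldPM_at T0 n hn (i : Int) (m : Int)
        (by positivity) (by exact_mod_cast hi) (by positivity) (by exact_mod_cast hm)
        pvOffs _ sh_m
      refine ⟨sh', ?_⟩
      intro a b ha hb
      rw [char' a b ha hb, char_m a b ha hb, pvNbrsL_offs, List.append_assoc]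
      congr 1
      by_cases h1 : a = (i : Int) ∧ b < (m : Int) ∧ pvVal T0 a b = 1
      · rw [if_pos h1, if_neg (by rintro ⟨_, h2⟩; omega),
          if_pos ⟨h1.1, by omega, h1.2.2⟩, List.append_nil]
      · rw [if_neg h1, List.nil_append]
        by_cases h2 : a = (i : Int) ∧ b = (m : Int)
        · rw [if_pos h2, if_pos ⟨h2.1, by omega, by rw [h2.1, h2.2]; exact hv⟩, h2.1, h2.2]
        · rw [if_neg h2, if_neg ?_]
          rintro ⟨hc1, hc2, hc3⟩
          by_cases hbm : b = (m : Int)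
          · exact h2 ⟨hc1, hbm⟩
          · exact h1 ⟨hc1, by omega, hc3⟩
    · rw [if_neg hv]
      refine ⟨sh_m, ?_⟩
      intro a b ha hb
      rw [char_m a b ha hb]
      congr 1
      by_cases h1 : a = (i : Int) ∧ b < (m : Int) ∧ pvVal T0 a b = 1
      · rw [if_pos h1, if_pos ⟨h1.1, by omega, h1.2.2⟩]
      · rw [if_neg h1, if_neg ?_]
        rintro ⟨hc1, hc2, hc3⟩
        by_cases hbm : b = (m : Int)
        · rw [hc1, hbm] at hc3; exact hv hc3
        · exact h1 ⟨hc1, by omega, hc3⟩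

theorem pvOuter_char (T0 : List (List Int)) (n : Nat) (hn : n = T0.length) :
    ∀ (m : Nat), m ≤ n → ∀ g, pvGShp n g →
      pvGShp n ((List.range m).foldl (fun g (i : Nat) =>
        (List.range n).foldl (fun g (j : Nat) =>
          if pvVal T0 (i : Int) (j : Int) = 1 then possibleMoves T0 g (i : Int) (j : Int) else g) g) g) ∧
      ∀ a b : Int, 0 ≤ a → 0 ≤ b →
        pvGraphAt ((List.range m).foldl (fun g (i : Nat) =>
          (List.range n).foldl (fun g (j : Nat) =>
            if pvVal T0 (i : Int) (j : Int) = 1 then possibleMoves T0 g (i : Int) (j : Int) else g) g) g) a b =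
          pvGraphAt g a b ++
            (if a < (m : Int) ∧ b < (n : Int) ∧ pvVal T0 a b = 1 then pvNbrs T0 a b else []) := by
  intro m
  induction m with
  | zero =>
    intro _ g hg
    refine ⟨by simpa using hg, fun a b ha hb => ?_⟩
    rw [if_neg (by rintro ⟨h2, _⟩; omega), List.range_zero, List.foldl_nil]
    simp
  | succ m ihm =>
    intro hm g hg
    obtain ⟨sh_m, char_m⟩ := ihm (by omega) g hg
    rw [List.range_succ, List.foldl_append, List.foldl_cons, List.foldl_nil]
    obtain ⟨sh', char'⟩ := pvInner_char T0 n hn m (by omega) n le_rfl _ sh_m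
    refine ⟨sh', ?_⟩
    intro a b ha hb
    rw [char' a b ha hb, char_m a b ha hb, List.append_assoc]
    congr 1
    by_cases h1 : a < (m : Int) ∧ b < (n : Int) ∧ pvVal T0 a b = 1
    · rw [if_pos h1, if_neg (by rintro ⟨h2, _⟩; omega),
        if_pos ⟨by omega, h1.2.1, h1.2.2⟩, List.append_nil]
    · rw [if_neg h1, List.nil_append]
      by_cases h2 : a = (m : Int) ∧ b < (n : Int) ∧ pvVal T0 a b = 1
      · rw [if_pos h2, if_pos ⟨by omega, h2.2.1, h2.2.2⟩]
      · rw [if_neg h2, if_neg ?_]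
        rintro ⟨hc1, hc2, hc3⟩
        by_cases ham : a = (m : Int)
        · exact h2 ⟨ham, hc2, hc3⟩
        · exact h1 ⟨by omega, hc2, hc3⟩

theorem pvG0_char (n : Nat) :
    pvGShp n ((List.range n).map (fun _ => (List.range n).map (fun _ => ([] : List (Int × Int))))) ∧
    ∀ a b : Int,
      pvGraphAt ((List.range n).map (fun _ => (List.range n).map (fun _ => ([] : List (Int × Int))))) a b = [] := by
  constructor
  · refine ⟨by simp, ?_⟩
    intro r hr
    rcases List.mem_map.mp hr with ⟨_, _, rfl⟩
    simp
  · intro a b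
    unfold pvGraphAt
    rcases h : (List.map (fun _ => List.map (fun _ => ([] : List (Int × Int))) (List.range n))
        (List.range n))[a.toNat]? with _ | r
    · simp only [List.getD_eq_getElem?_getD]
      rw [h]
      simp
    · simp only [List.getD_eq_getElem?_getD]
      rw [h]
      simp only [Option.getD_some]
      have hr : r = List.map (fun _ => ([] : List (Int × Int))) (List.range n) := by
        have hm := List.mem_of_getElem? h
        rcases List.mem_map.mp hm with ⟨_, _, rfl⟩
        rfl
      rcases h2 : r[b.toNat]? with _ | z
      · rfl
      · simp only [Option.getD_some]
        have hz := List.mem_of_getElem? h2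
        rw [hr] at hz
        rcases List.mem_map.mp hz with ⟨_, _, rfl⟩
        rfl

theorem pvBuild_char (T0 : List (List Int)) :
    pvGChar T0
      ((List.range T0.length).foldl (fun g (i : Nat) =>
        (List.range T0.length).foldl (fun g (j : Nat) =>
          if pvVal T0 (i : Int) (j : Int) = 1 then possibleMoves T0 g (i : Int) (j : Int) else g) g)
        ((List.range T0.length).map
          (fun _ => (List.range T0.length).map (fun _ => ([] : List (Int × Int)))))) := by
  obtain ⟨hg0s, hg0c⟩ := pvG0_char T0.length
  obtain ⟨_, hchar⟩ := pvOuter_char T0 T0.length rfl T0.length le_rfl _ hg0s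
  intro a b ha hb
  rw [hchar a b ha hb, hg0c a b, List.nil_append]

theorem pvNbrs_mem (T0 : List (List Int)) (x y : Int) (v : Int × Int) :
    v ∈ pvNbrs T0 x y ↔
      (v.1 - x, v.2 - y) ∈ pvOffs ∧ 0 ≤ v.1 ∧ 0 ≤ v.2 ∧ v.1 < (T0.length : Int) ∧
        v.2 < (T0.length : Int) ∧ pvVal T0 v.1 v.2 = 1 := by
  unfold pvNbrs
  rw [List.mem_filter, List.mem_map]
  constructor
  · rintro ⟨⟨d, hd, rfl⟩, hpred⟩
    simp only [Bool.and_eq_true, decide_eq_true_eq, beq_iff_eq] at hpred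
    obtain ⟨⟨hb1, hb2, hb3, hb4⟩, hv⟩ := hpred
    refine ⟨by simpa using hd, hb1, hb2, hb3, hb4, hv⟩
  · rintro ⟨hoff, h1, h2, h3, h4, h5⟩
    refine ⟨⟨(v.1 - x, v.2 - y), hoff, by simp⟩, ?_⟩
    simp only [Bool.and_eq_true, decide_eq_true_eq, beq_iff_eq]
    exact ⟨⟨h1, h2, h3, h4⟩, h5⟩

theorem pvGChar_mem_iff (T0 : List (List Int)) (g : List (List (List (Int × Int))))
    (hg : pvGChar T0 g) (u v : Int × Int) (hu1 : 0 ≤ u.1) (hu2 : 0 ≤ u.2) :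
    v ∈ pvGraphAt g u.1 u.2 ↔ pvEdge T0 u v := by
  rw [hg u.1 u.2 hu1 hu2]
  constructor
  · intro hv
    split at hv
    · rename_i hcond
      rw [pvNbrs_mem] at hv
      obtain ⟨hoff, h1, h2, h3, h4, h5⟩ := hv
      exact ⟨⟨hu1, hcond.1, hu2, hcond.2.1⟩, ⟨h1, h3, h2, h4⟩, hoff, hcond.2.2, h5⟩
    · simp at hv
  · rintro ⟨hbu, hbv, hoff, hv1, hv2⟩
    rw [if_pos ⟨hbu.2.1, hbu.2.2.2, hv1⟩, pvNbrs_mem]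
    exact ⟨hoff, hbv.1, hbv.2.2.1, hbv.2.1, hbv.2.2.2, hv2⟩

-- A-side: what one `dfs` call does ----------------------------------------------

/-- joint post-condition of `dfs(graph, T, u)` -/
def pvDfsConcl (T0 : List (List Int)) (g : List (List (List (Int × Int))))
    (T : List (List Int)) (u : Int × Int) (T' : List (List Int)) : Prop :=
  (∀ c : Int × Int, 0 ≤ c.1 → 0 ≤ c.2 →
      pvVal T' c.1 c.2 = pvVal T c.1 c.2 ∨
        (pvVal T' c.1 c.2 = 0 ∧
          (c = u ∨ (Relation.ReflTransGen (pvEdge T0) u c ∧ pvVal T c.1 c.2 = 1)))) ∧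
  (∀ c : Int × Int, 0 ≤ c.1 → 0 ≤ c.2 → pvVal T c.1 c.2 ≠ 1 → pvVal T' c.1 c.2 ≠ 1) ∧
  (∀ a : Int × Int, 0 ≤ a.1 → 0 ≤ a.2 →
      (a = u ∨ pvVal T' a.1 a.2 ≠ pvVal T a.1 a.2) →
      ∀ v ∈ pvGraphAt g a.1 a.2, pvVal T' v.1 v.2 ≠ 1) ∧
  (pvValid T u.1 u.2 → pvVal T' u.1 u.2 ≠ 1) ∧
  T'.length = T.length

theorem pvDfsA_spec (T0 : List (List Int)) (g : List (List (List (Int × Int))))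
    (hg : pvGChar T0 g) :
    ∀ (f : Nat) (T : List (List Int)) (u : Int × Int),
      pvOnesR T0.length T < f → T.length = T0.length → 0 ≤ u.1 → 0 ≤ u.2 →
      (u = (0, 0) ∨ pvInb T0.length u) →
      (pvVal T u.1 u.2 = 1 ∨ pvGraphAt g u.1 u.2 = []) →
      pvDfsConcl T0 g T u (dfsA g f T u) := by
  intro f
  induction f with
  | zero => intro T u hf; omega
  | succ f ihf =>
    intro T u hf hTlen hu1 hu2 hu0 hgrow
    simp only [dfsA]
    have hset := fun (a b : Int) (ha : 0 ≤ a) (hb : 0 ≤ b) =>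
      pvVal_set0 T u.1 u.2 a b hu1 hu2 ha hb
    have hlen1 : (pvSet0 T u.1 u.2).length = T.length := by
      unfold pvSet0; rw [List.length_set]
    by_cases hval : pvVal T u.1 u.2 = 1
    · -- the popped cell is live: its whole adjacency list is walked
      have hvalid := pvValid_of_val_one T u.1 u.2 hu1 hu2 hval
      have hinb : pvInb T0.length u := by
        rcases hu0 with rfl | h
        · have h1 := hvalid.2.2.1
          simp only [Int.toNat_zero] at h1
          exact ⟨le_rfl, by omega, le_rfl, by omega⟩
        · exact h
      have hones1 : pvOnesR T0.length (pvSet0 T u.1 u.2) < pvOnesR T0.length T :=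
        pvOnesR_set0_lt T0.length T u.1 u.2 hinb hval
      have hL : ∀ v ∈ pvGraphAt g u.1 u.2, pvEdge T0 u v :=
        fun v hv => (pvGChar_mem_iff T0 g hg u v hu1 hu2).1 hv
      have hfold : ∀ (L : List (Int × Int)), (∀ v ∈ L, pvEdge T0 u v) →
          ∀ (Tc : List (List Int)), pvOnesR T0.length Tc < f → Tc.length = T0.length →
          (∀ c : Int × Int, 0 ≤ c.1 → 0 ≤ c.2 →
            pvVal (L.foldl (fun T v => if pvVal T v.1 v.2 = 1 then dfsA g f T v else T) Tc) c.1 c.2 = pvVal Tc c.1 c.2 ∨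
              (pvVal (L.foldl (fun T v => if pvVal T v.1 v.2 = 1 then dfsA g f T v else T) Tc) c.1 c.2 = 0 ∧
                Relation.ReflTransGen (pvEdge T0) u c ∧ pvVal Tc c.1 c.2 = 1)) ∧
          (∀ c : Int × Int, 0 ≤ c.1 → 0 ≤ c.2 → pvVal Tc c.1 c.2 ≠ 1 →
            pvVal (L.foldl (fun T v => if pvVal T v.1 v.2 = 1 then dfsA g f T v else T) Tc) c.1 c.2 ≠ 1) ∧
          (∀ a : Int × Int, 0 ≤ a.1 → 0 ≤ a.2 →
            pvVal (L.foldl (fun T v => if pvVal T v.1 v.2 = 1 then dfsA g f T v else T) Tc) a.1 a.2 ≠ pvVal Tc a.1 a.2 →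
            ∀ w ∈ pvGraphAt g a.1 a.2,
              pvVal (L.foldl (fun T v => if pvVal T v.1 v.2 = 1 then dfsA g f T v else T) Tc) w.1 w.2 ≠ 1) ∧
          (∀ v ∈ L, pvVal (L.foldl (fun T v => if pvVal T v.1 v.2 = 1 then dfsA g f T v else T) Tc) v.1 v.2 ≠ 1) ∧
          pvOnesR T0.length (L.foldl (fun T v => if pvVal T v.1 v.2 = 1 then dfsA g f T v else T) Tc) ≤ pvOnesR T0.length Tc ∧
          (L.foldl (fun T v => if pvVal T v.1 v.2 = 1 then dfsA g f T v else T) Tc).length = Tc.length := by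
        intro L
        induction L with
        | nil =>
          intro _ Tc _ _
          exact ⟨fun c _ _ => Or.inl rfl, fun c _ _ h => h,
            fun a _ _ ha => absurd rfl ha, fun v hv => absurd hv (List.not_mem_nil),
            le_rfl, rfl⟩
        | cons v L ihL =>
          intro hLE Tc hones hTc
          have hEv : pvEdge T0 u v := hLE v List.mem_cons_self
          have hvnn1 : (0 : Int) ≤ v.1 := hEv.2.1.1
          have hvnn2 : (0 : Int) ≤ v.2 := hEv.2.1.2.2.1
          simp only [List.foldl_cons]
          by_cases hv1 : pvVal Tc v.1 v.2 = 1
          · rw [if_pos hv1]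
            obtain ⟨C1, C2, C3, C4, C5⟩ :=
              ihf Tc v hones hTc hvnn1 hvnn2 (Or.inr hEv.2.1) (Or.inl hv1)
            have hchildones : pvOnesR T0.length (dfsA g f Tc v) ≤ pvOnesR T0.length Tc := by
              apply pvOnesR_mono
              intro a b ha hb hab
              rcases C1 (a, b) ha hb with h | ⟨h0, _⟩
              · rw [← h]; exact hab
              · rw [hab] at h0; exact absurd h0 (by norm_num)
            obtain ⟨G1, G2, G3, G4, G5, G6⟩ :=
              ihL (fun w hw => hLE w (List.mem_cons_of_mem v hw)) (dfsA g f Tc v)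
                (lt_of_le_of_lt hchildones hones) (by rw [C5, hTc])
            refine ⟨?_, ?_, ?_, ?_, ?_, ?_⟩
            · intro c hc1 hc2
              rcases G1 c hc1 hc2 with h | ⟨h0, hR, h1⟩
              · rw [h]
                rcases C1 c hc1 hc2 with h' | ⟨h0', hcu⟩
                · exact Or.inl h'
                · refine Or.inr ⟨h0', ?_, ?_⟩
                  · rcases hcu with rfl | ⟨hRv, _⟩
                    · exact Relation.ReflTransGen.single hEv
                    · exact (Relation.ReflTransGen.single hEv).trans hRv
                  · rcases hcu with rfl | ⟨_, hv1'⟩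
                    · exact hv1
                    · exact hv1'
              · refine Or.inr ⟨h0, hR, ?_⟩
                rcases C1 c hc1 hc2 with h' | ⟨h0', _⟩
                · rw [← h']; exact h1
                · rw [h0'] at h1; exact absurd h1 (by norm_num)
            · intro c hc1 hc2 hc
              exact G2 c hc1 hc2 (C2 c hc1 hc2 hc)
            · intro a ha1 ha2 hchange w hw
              have hEaw := (pvGChar_mem_iff T0 g hg a w ha1 ha2).1 hw
              have hw1 : (0 : Int) ≤ w.1 := hEaw.2.1.1
              have hw2 : (0 : Int) ≤ w.2 := hEaw.2.1.2.2.1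
              by_cases hca : pvVal (dfsA g f Tc v) a.1 a.2 = pvVal Tc a.1 a.2
              · exact G3 a ha1 ha2 (fun hcc => hchange (hcc.trans hca)) w hw
              · exact G2 w hw1 hw2 (C3 a ha1 ha2 (Or.inr hca) w hw)
            · intro w hwmem
              rcases List.mem_cons.mp hwmem with rfl | hwmem
              · exact G2 w hvnn1 hvnn2 (C4 (pvValid_of_val_one Tc w.1 w.2 hvnn1 hvnn2 hv1))
              · exact G4 w hwmem
            · exact le_trans G5 hchildones
            · rw [G6, C5]
          · rw [if_neg hv1]
            obtain ⟨G1, G2, G3, G4, G5, G6⟩ :=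
              ihL (fun w hw => hLE w (List.mem_cons_of_mem v hw)) Tc hones hTc
            refine ⟨G1, G2, G3, ?_, G5, G6⟩
            intro w hwmem
            rcases List.mem_cons.mp hwmem with rfl | hwmem
            · exact G2 w hvnn1 hvnn2 hv1
            · exact G4 w hwmem
      obtain ⟨G1, G2, G3, G4, G5, G6⟩ := hfold (pvGraphAt g u.1 u.2) hL
        (pvSet0 T u.1 u.2) (by omega) (by rw [hlen1, hTlen])
      refine ⟨?_, ?_, ?_, ?_, ?_⟩
      · intro c hc1 hc2
        rcases G1 c hc1 hc2 with h | ⟨h0, hR, h1⟩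
        · by_cases hcu : c.1 = u.1 ∧ c.2 = u.2
          · refine Or.inr ⟨?_, Or.inl (Prod.ext hcu.1 hcu.2)⟩
            rw [h, hset c.1 c.2 hc1 hc2, if_pos ⟨hcu.1, hcu.2, hvalid⟩]
          · left
            rw [h, hset c.1 c.2 hc1 hc2, if_neg (fun hcc => hcu ⟨hcc.1, hcc.2.1⟩)]
        · rw [hset c.1 c.2 hc1 hc2] at h1
          split at h1
          · exact absurd h1 (by norm_num)
          · exact Or.inr ⟨h0, Or.inr ⟨hR, h1⟩⟩
      · intro c hc1 hc2 hc
        apply G2 c hc1 hc2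
        rw [hset c.1 c.2 hc1 hc2]
        split
        · norm_num
        · exact hc
      · intro a ha1 ha2 hau w hw
        rcases hau with rfl | hchange
        · exact G4 w hw
        · by_cases h1a : pvVal ((pvGraphAt g u.1 u.2).foldl
              (fun T v => if pvVal T v.1 v.2 = 1 then dfsA g f T v else T)
              (pvSet0 T u.1 u.2)) a.1 a.2 = pvVal (pvSet0 T u.1 u.2) a.1 a.2
          · have hchg1 : pvVal (pvSet0 T u.1 u.2) a.1 a.2 ≠ pvVal T a.1 a.2 := by
              intro hcc
              exact hchange (h1a.trans hcc)
            rw [hset a.1 a.2 ha1 ha2] at hchg1 h1a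
            split at hchg1
            · rename_i hcc
              have ha : a = u := Prod.ext hcc.1 hcc.2.1
              rw [ha] at hw
              exact G4 w hw
            · exact absurd rfl hchg1
          · exact G3 a ha1 ha2 h1a w hw
      · intro hvd
        apply G2 u hu1 hu2
        rw [hset u.1 u.2 hu1 hu2, if_pos ⟨rfl, rfl, hvd⟩]
        norm_num
      · rw [G6, hlen1]
    · have hadj : pvGraphAt g u.1 u.2 = [] := hgrow.resolve_left hval
      rw [hadj]
      simp only [List.foldl_nil]
      refine ⟨?_, ?_, ?_, ?_, ?_⟩
      · intro c hc1 hc2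
        rw [hset c.1 c.2 hc1 hc2]
        split
        · rename_i hcc
          exact Or.inr ⟨rfl, Or.inl (Prod.ext hcc.1 hcc.2.1)⟩
        · exact Or.inl rfl
      · intro c hc1 hc2 hc
        rw [hset c.1 c.2 hc1 hc2]
        split
        · norm_num
        · exact hc
      · intro a ha1 ha2 hau w hw
        rcases hau with rfl | hchange
        · rw [hadj] at hw
          exact absurd hw (List.not_mem_nil)
        · rw [hset a.1 a.2 ha1 ha2] at hchange
          split at hchange
          · rename_i hcc
            have ha : a = u := Prod.ext hcc.1 hcc.2.1
            rw [ha, hadj] at hw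
            exact absurd hw (List.not_mem_nil)
          · exact absurd rfl hchange
      · intro hvd
        rw [hset u.1 u.2 hu1 hu2, if_pos ⟨rfl, rfl, hvd⟩]
        norm_num
      · exact hlen1

-- B-side: loop invariant ---------------------------------------------------------

/-- invariant of Source B's `while` loop -/
def pvInvB (T0 : List (List Int)) (T : List (List Int)) (st : List (Int × Int)) : Prop :=
  (∀ c : Int × Int, 0 ≤ c.1 → 0 ≤ c.2 →
      pvVal T c.1 c.2 = pvVal T0 c.1 c.2 ∨
        (pvVal T c.1 c.2 = 0 ∧ pvVal T0 c.1 c.2 = 1 ∧ pvRch T0 c ∧ pvInb T0.length c)) ∧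
  (∀ u ∈ st, pvInb T0.length u ∧ pvVal T0 u.1 u.2 = 1 ∧ pvRch T0 u ∧ pvVal T u.1 u.2 ≠ 1) ∧
  (∀ a : Int × Int, 0 ≤ a.1 → 0 ≤ a.2 → pvVal T a.1 a.2 ≠ 1 → pvVal T0 a.1 a.2 = 1 →
      pvInb T0.length a →
      a ∈ st ∨ ∀ b : Int × Int, pvEdge T0 a b → pvVal T b.1 b.2 ≠ 1)

theorem pvFoldB_spec (T0 : List (List Int)) (x y : Int)
    (hx : pvInb T0.length (x, y)) (hx1 : pvVal T0 x y = 1) :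
    ∀ (L : List (Int × Int)), (∀ d ∈ L, d ∈ pvOffs) →
      ∀ (p : List (List Int) × List (Int × Int)),
      (∀ c : Int × Int, 0 ≤ c.1 → 0 ≤ c.2 → pvVal p.1 c.1 c.2 = 1 → pvVal T0 c.1 c.2 = 1) →
      (∀ c : Int × Int, 0 ≤ c.1 → 0 ≤ c.2 →
        pvVal (L.foldl (pvStepB (T0.length : Int) x y) p).1 c.1 c.2 = pvVal p.1 c.1 c.2 ∨
          (pvVal (L.foldl (pvStepB (T0.length : Int) x y) p).1 c.1 c.2 = 0 ∧
            pvVal p.1 c.1 c.2 = 1 ∧ pvEdge T0 (x, y) c ∧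
            c ∈ (L.foldl (pvStepB (T0.length : Int) x y) p).2)) ∧
      (∀ u ∈ p.2, u ∈ (L.foldl (pvStepB (T0.length : Int) x y) p).2) ∧
      (∀ u ∈ (L.foldl (pvStepB (T0.length : Int) x y) p).2,
        u ∈ p.2 ∨ (pvEdge T0 (x, y) u ∧
          pvVal (L.foldl (pvStepB (T0.length : Int) x y) p).1 u.1 u.2 ≠ 1)) ∧
      (∀ d ∈ L, pvInb T0.length (x + d.1, y + d.2) →
        pvVal (L.foldl (pvStepB (T0.length : Int) x y) p).1 (x + d.1) (y + d.2) ≠ 1) ∧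
      (∀ c : Int × Int, 0 ≤ c.1 → 0 ≤ c.2 → pvVal p.1 c.1 c.2 ≠ 1 →
        pvVal (L.foldl (pvStepB (T0.length : Int) x y) p).1 c.1 c.2 ≠ 1) := by
  intro L
  induction L with
  | nil =>
    intro _ p _
    refine ⟨fun c _ _ => Or.inl rfl, fun u hu => hu, fun u hu => Or.inl hu,
      fun d hd => absurd hd (List.not_mem_nil), fun c _ _ h => h⟩
  | cons d L ih =>
    intro hL p hcompat
    simp only [List.foldl_cons]
    by_cases hg : 0 ≤ x + d.1 ∧ x + d.1 < (T0.length : Int) ∧ 0 ≤ y + d.2 ∧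
        y + d.2 < (T0.length : Int) ∧ pvVal p.1 (x + d.1) (y + d.2) = 1
    · have hstep : pvStepB (T0.length : Int) x y p d =
          (pvSet0 p.1 (x + d.1) (y + d.2), (x + d.1, y + d.2) :: p.2) := by
        unfold pvStepB; rw [if_pos hg]
      obtain ⟨hb1, hb2, hb3, hb4, hv1⟩ := hg
      have hvalid := pvValid_of_val_one p.1 (x + d.1) (y + d.2) hb1 hb3 hv1
      have hT0d : pvVal T0 (x + d.1) (y + d.2) = 1 := hcompat (x + d.1, y + d.2) hb1 hb3 hv1
      have hEdge : pvEdge T0 (x, y) (x + d.1, y + d.2) := by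
        refine ⟨hx, ⟨hb1, hb2, hb3, hb4⟩, ?_, hx1, hT0d⟩
        have : (x + d.1 - x, y + d.2 - y) = d := by simp
        rw [this]; exact hL d List.mem_cons_self
      have hset := fun (a b : Int) (ha : 0 ≤ a) (hb : 0 ≤ b) =>
        pvVal_set0 p.1 (x + d.1) (y + d.2) a b hb1 hb3 ha hb
      rw [hstep]
      set p' : List (List Int) × List (Int × Int) :=
        (pvSet0 p.1 (x + d.1) (y + d.2), (x + d.1, y + d.2) :: p.2) with hp'
      have hcompat' : ∀ c : Int × Int, 0 ≤ c.1 → 0 ≤ c.2 →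
          pvVal p'.1 c.1 c.2 = 1 → pvVal T0 c.1 c.2 = 1 := by
        intro c hc1 hc2 hc
        rw [hp'] at hc
        simp only at hc
        rw [hset c.1 c.2 hc1 hc2] at hc
        split at hc
        · exact absurd hc (by norm_num)
        · exact hcompat c hc1 hc2 hc
      obtain ⟨F1, F2, F3, F4, F5⟩ := ih (fun e he => hL e (List.mem_cons_of_mem d he)) p' hcompat'
      have hmono' : ∀ c : Int × Int, 0 ≤ c.1 → 0 ≤ c.2 →
          pvVal p.1 c.1 c.2 ≠ 1 → pvVal p'.1 c.1 c.2 ≠ 1 := by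
        intro c hc1 hc2 hc
        rw [hp']; simp only
        rw [hset c.1 c.2 hc1 hc2]
        split
        · norm_num
        · exact hc
      have hmem : (x + d.1, y + d.2) ∈ (L.foldl (pvStepB (T0.length : Int) x y) p').2 :=
        F2 _ List.mem_cons_self
      have hzero : pvVal (L.foldl (pvStepB (T0.length : Int) x y) p').1
          (x + d.1) (y + d.2) ≠ 1 := by
        apply F5 (x + d.1, y + d.2) hb1 hb3
        show pvVal p'.1 (x + d.1) (y + d.2) ≠ 1
        rw [hp']; simp only
        rw [hset _ _ hb1 hb3, if_pos ⟨rfl, rfl, hvalid⟩]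
        norm_num
      refine ⟨?_, ?_, ?_, ?_, ?_⟩
      · intro c hc1 hc2
        rcases F1 c hc1 hc2 with h | ⟨h0, h1, hE, hm⟩
        · rw [hp'] at h; simp only at h
          rw [hset c.1 c.2 hc1 hc2] at h
          split at h
          · rename_i hcc
            right
            have hc' : c = (x + d.1, y + d.2) := Prod.ext hcc.1 hcc.2.1
            refine ⟨h, by rw [hc']; exact hv1, by rw [hc']; exact hEdge, by rw [hc']; exact hmem⟩
          · left; exact h
        · right
          rw [hp'] at h1; simp only at h1
          rw [hset c.1 c.2 hc1 hc2] at h1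
          split at h1
          · exact absurd h1 (by norm_num)
          · exact ⟨h0, h1, hE, hm⟩
      · intro u hu
        exact F2 u (List.mem_cons_of_mem _ hu)
      · intro u hu
        rcases F3 u hu with h | h
        · rw [hp'] at h; simp only at h
          rcases List.mem_cons.mp h with h | h
          · right
            refine ⟨by rw [h]; exact hEdge, by rw [h]; exact hzero⟩
          · left; exact h
        · right; exact h
      · intro e he hin
        rcases List.mem_cons.mp he with rfl | he
        · exact hzero
        · exact F4 e he hin
      · intro c hc1 hc2 hc
        exact F5 c hc1 hc2 (hmono' c hc1 hc2 hc)
    · have hstep : pvStepB (T0.length : Int) x y p d = p := by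
        unfold pvStepB; rw [if_neg hg]
      rw [hstep]
      obtain ⟨F1, F2, F3, F4, F5⟩ := ih (fun e he => hL e (List.mem_cons_of_mem d he)) p hcompat
      refine ⟨F1, F2, F3, ?_, F5⟩
      intro e he hin
      rcases List.mem_cons.mp he with rfl | he
      · obtain ⟨hb1, hb2, hb3, hb4⟩ := hin
        have hv : pvVal p.1 (x + e.1) (y + e.2) ≠ 1 := fun hv =>
          hg ⟨hb1, hb2, hb3, hb4, hv⟩
        exact F5 (x + e.1, y + e.2) hb1 hb3 hv
      · exact F4 e he hin

theorem pvLoopB_spec (T0 : List (List Int)) :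
    ∀ (T : List (List Int)) (st : List (Int × Int)), pvInvB T0 T st →
      pvInvB T0 (loopB (T0.length : Int) T st) [] ∧
      (∀ c : Int × Int, 0 ≤ c.1 → 0 ≤ c.2 → pvVal T c.1 c.2 ≠ 1 →
        pvVal (loopB (T0.length : Int) T st) c.1 c.2 ≠ 1) := by
  intro T st
  fun_induction loopB (T0.length : Int) T st with
  | case1 T =>
    intro hInv
    exact ⟨hInv, fun c _ _ h => h⟩
  | case2 T x y rest s ih =>
    intro hInv
    obtain ⟨I1, I2, I3⟩ := hInv
    obtain ⟨hinb, hT0xy, hRch, hmark⟩ := I2 (x, y) List.mem_cons_self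
    have hcompat : ∀ c : Int × Int, 0 ≤ c.1 → 0 ≤ c.2 →
        pvVal T c.1 c.2 = 1 → pvVal T0 c.1 c.2 = 1 := by
      intro c hc1 hc2 hc
      rcases I1 c hc1 hc2 with h | ⟨h0, _⟩
      · rw [← h]; exact hc
      · rw [hc] at h0; exact absurd h0 (by norm_num)
    obtain ⟨F1, F2, F3, F4, F5⟩ :=
      pvFoldB_spec T0 x y hinb hT0xy pvOffs (fun d hd => hd) (T, rest) hcompat
    have hInv' : pvInvB T0 s.1 s.2 := by
      refine ⟨?_, ?_, ?_⟩
      · intro c hc1 hc2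
        rcases F1 c hc1 hc2 with h | ⟨h0, h1, hE, hm⟩
        · rw [h]; exact I1 c hc1 hc2
        · exact Or.inr ⟨h0, hcompat c hc1 hc2 h1, hRch.tail hE, hE.2.1⟩
      · intro u hu
        rcases F3 u hu with h | ⟨hE, hne⟩
        · obtain ⟨hi, ht, hr, hm⟩ := I2 u (List.mem_cons_of_mem _ h)
          exact ⟨hi, ht, hr, F5 u hi.1 hi.2.2.1 hm⟩
        · exact ⟨hE.2.1, hE.2.2.2.2, hRch.tail hE, hne⟩
      · intro a ha1 ha2 hane haT0 hain
        by_cases hTa : pvVal T a.1 a.2 = 1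
        · rcases F1 a ha1 ha2 with h | ⟨_, _, _, hm⟩
          · rw [h] at hane; exact absurd hTa hane
          · exact Or.inl hm
        · rcases I3 a ha1 ha2 hTa haT0 hain with hmem | hcl
          · rcases List.mem_cons.mp hmem with heq | hmem
            · right
              intro b hEb
              rw [heq] at hEb
              have h4 := F4 (b.1 - x, b.2 - y) hEb.2.2.1 (by simpa using hEb.2.1)
              simpa using h4
            · exact Or.inl (F2 a hmem)
          · right
            intro b hEb
            exact F5 b hEb.2.1.1 hEb.2.1.2.2.1 (hcl b hEb)
    obtain ⟨hI, hM⟩ := ih hInv'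
    refine ⟨hI, ?_⟩
    intro c hc1 hc2 hc
    exact hM c hc1 hc2 (F5 c hc1 hc2 hc)

-- Common final-grid characterisation → the scans agree ---------------------------

theorem pvFinal_A (T0 : List (List Int)) (hP : Pre_knights_moves T0) :
    ∀ c : Int × Int, 0 ≤ c.1 → 0 ≤ c.2 →
      (pvVal (dfsA
        ((List.range T0.length).foldl (fun g (i : Nat) =>
          (List.range T0.length).foldl (fun g (j : Nat) =>
            if pvVal T0 (i : Int) (j : Int) = 1 then possibleMoves T0 g (i : Int) (j : Int) else g) g)
          ((List.range T0.length).map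
            (fun _ => (List.range T0.length).map (fun _ => ([] : List (Int × Int))))))
        (T0.length * T0.length + 1) T0 (0, 0)) c.1 c.2 = 1 ↔
        (pvVal T0 c.1 c.2 = 1 ∧ ¬ pvRch T0 c)) := by
  have hg := pvBuild_char T0
  have hlen0 : 0 < T0.length := List.length_pos_of_ne_nil hP.1
  have hvalid00 : pvValid T0 0 0 := by
    have hrow : T0.length ≤ (T0.getD 0 []).length := by
      apply hP.2
      rw [List.getD_eq_getElem T0 [] hlen0]
      exact List.getElem_mem hlen0
    exact ⟨le_rfl, le_rfl, by simpa using hlen0, by simp only [Int.toNat_zero]; omega⟩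
  have hgrow : pvVal T0 ((0 : Int), (0 : Int)).1 ((0 : Int), (0 : Int)).2 = 1 ∨
      pvGraphAt ((List.range T0.length).foldl (fun g (i : Nat) =>
        (List.range T0.length).foldl (fun g (j : Nat) =>
          if pvVal T0 (i : Int) (j : Int) = 1 then possibleMoves T0 g (i : Int) (j : Int) else g) g)
        ((List.range T0.length).map
          (fun _ => (List.range T0.length).map (fun _ => ([] : List (Int × Int))))))
        ((0 : Int), (0 : Int)).1 ((0 : Int), (0 : Int)).2 = [] := by
    by_cases hv : pvVal T0 0 0 = 1
    · exact Or.inl hv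
    · right
      rw [hg 0 0 le_rfl le_rfl, if_neg (fun hcc => hv hcc.2.2)]
  obtain ⟨C1, C2, C3, C4, C5⟩ := pvDfsA_spec T0 _ hg (T0.length * T0.length + 1) T0
    ((0 : Int), (0 : Int)) (by have := pvOnesR_le T0.length T0; omega) rfl le_rfl le_rfl
    (Or.inl rfl) hgrow
  have hreach : ∀ e : Int × Int, pvRch T0 e →
      pvVal (dfsA ((List.range T0.length).foldl (fun g (i : Nat) =>
        (List.range T0.length).foldl (fun g (j : Nat) =>
          if pvVal T0 (i : Int) (j : Int) = 1 then possibleMoves T0 g (i : Int) (j : Int) else g) g)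
        ((List.range T0.length).map
          (fun _ => (List.range T0.length).map (fun _ => ([] : List (Int × Int))))))
        (T0.length * T0.length + 1) T0 (0, 0)) e.1 e.2 ≠ 1 := by
    intro e he
    induction he with
    | refl => exact C4 hvalid00
    | tail hR hE ih =>
      rename_i b e'
      have hb1 : (0 : Int) ≤ b.1 := hE.1.1
      have hb2 : (0 : Int) ≤ b.2 := hE.1.2.2.1
      have hbchg : pvVal (dfsA ((List.range T0.length).foldl (fun g (i : Nat) =>
          (List.range T0.length).foldl (fun g (j : Nat) =>
            if pvVal T0 (i : Int) (j : Int) = 1 then possibleMoves T0 g (i : Int) (j : Int) else g) g)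
          ((List.range T0.length).map
            (fun _ => (List.range T0.length).map (fun _ => ([] : List (Int × Int))))))
          (T0.length * T0.length + 1) T0 (0, 0)) b.1 b.2 ≠ pvVal T0 b.1 b.2 := by
        intro hcc
        rw [hE.2.2.2.1] at hcc
        exact ih hcc
      exact C3 b hb1 hb2 (Or.inr hbchg) e' ((pvGChar_mem_iff T0 _ hg b e' hb1 hb2).2 hE)
  intro c hc1 hc2
  constructor
  · intro h1
    rcases C1 c hc1 hc2 with h | ⟨h0, _⟩
    · rw [h] at h1
      exact ⟨h1, fun hR => hreach c hR (by rw [h]; exact h1)⟩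
    · rw [h1] at h0
      exact absurd h0 (by norm_num)
  · rintro ⟨h1, hnr⟩
    rcases C1 c hc1 hc2 with h | ⟨_, hcu⟩
    · rw [h]; exact h1
    · rcases hcu with h0 | ⟨hR, _⟩
      · exact absurd (h0 ▸ Relation.ReflTransGen.refl : pvRch T0 c) hnr
      · exact absurd hR hnr

theorem pvFinal_B (T0 : List (List Int)) (hP : Pre_knights_moves T0) :
    ∀ c : Int × Int, 0 ≤ c.1 → 0 ≤ c.2 →
      (pvVal (if T0.length ≠ 0 ∧ pvVal T0 0 0 = 1
          then loopB (T0.length : Int) (pvSet0 T0 0 0) [(0, 0)] else T0) c.1 c.2 = 1 ↔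
        (pvVal T0 c.1 c.2 = 1 ∧ ¬ pvRch T0 c)) := by
  intro c hc1 hc2
  by_cases hg : T0.length ≠ 0 ∧ pvVal T0 0 0 = 1
  · rw [if_pos hg]
    obtain ⟨hn, hv00⟩ := hg
    have hvalid := pvValid_of_val_one T0 0 0 le_rfl le_rfl hv00
    have hset := fun (a b : Int) (ha : 0 ≤ a) (hb : 0 ≤ b) =>
      pvVal_set0 T0 0 0 a b le_rfl le_rfl ha hb
    have hinb00 : pvInb T0.length ((0 : Int), (0 : Int)) := by
      refine ⟨le_rfl, by omega, le_rfl, by omega⟩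
    have hInv0 : pvInvB T0 (pvSet0 T0 0 0) [(0, 0)] := by
      refine ⟨?_, ?_, ?_⟩
      · intro e he1 he2
        rw [hset e.1 e.2 he1 he2]
        split
        · rename_i hee
          have he0 : e = ((0 : Int), (0 : Int)) := Prod.ext hee.1 hee.2.1
          rw [he0]
          exact Or.inr ⟨rfl, hv00, Relation.ReflTransGen.refl, hinb00⟩
        · exact Or.inl rfl
      · intro u hu
        rcases List.mem_cons.mp hu with rfl | hu
        · refine ⟨hinb00, hv00, Relation.ReflTransGen.refl, ?_⟩
          rw [hset 0 0 le_rfl le_rfl, if_pos ⟨rfl, rfl, hvalid⟩]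
          norm_num
        · exact absurd hu (List.not_mem_nil)
      · intro a ha1 ha2 hane haT0 _
        rw [hset a.1 a.2 ha1 ha2] at hane
        split at hane
        · rename_i hee
          have ha0 : a = ((0 : Int), (0 : Int)) := Prod.ext hee.1 hee.2.1
          exact Or.inl (by rw [ha0]; exact List.mem_cons_self)
        · exact absurd haT0 hane
    obtain ⟨⟨J1, _, J3⟩, hM⟩ := pvLoopB_spec T0 (pvSet0 T0 0 0) [(0, 0)] hInv0
    have hreach : ∀ e : Int × Int, pvRch T0 e →
        pvVal (loopB (T0.length : Int) (pvSet0 T0 0 0) [(0, 0)]) e.1 e.2 ≠ 1 := by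
      intro e he
      induction he with
      | refl =>
        apply hM (0, 0) le_rfl le_rfl
        show pvVal (pvSet0 T0 0 0) 0 0 ≠ 1
        rw [hset 0 0 le_rfl le_rfl, if_pos ⟨rfl, rfl, hvalid⟩]
        norm_num
      | tail hR hE ih =>
        rename_i b e'
        rcases J3 b hE.1.1 hE.1.2.2.1 ih hE.2.2.2.1 hE.1 with hmem | hcl
        · exact absurd hmem (List.not_mem_nil)
        · exact hcl e' hE
    constructor
    · intro h1
      rcases J1 c hc1 hc2 with h | ⟨h0, _⟩
      · rw [h] at h1
        exact ⟨h1, fun hR => hreach c hR (by rw [h]; exact h1)⟩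
      · rw [h1] at h0; exact absurd h0 (by norm_num)
    · rintro ⟨h1, hnr⟩
      rcases J1 c hc1 hc2 with h | ⟨_, _, hR, _⟩
      · rw [h]; exact h1
      · exact absurd hR hnr
  · rw [if_neg hg]
    have hn : T0.length ≠ 0 := by
      have h0 := hP.1
      intro hl
      exact h0 (List.eq_nil_of_length_eq_zero hl)
    have hv00 : pvVal T0 0 0 ≠ 1 := fun hv => hg ⟨hn, hv⟩
    constructor
    · intro h1
      refine ⟨h1, fun hR => ?_⟩
      rcases hR.cases_head with hc0 | ⟨v, hE, _⟩
      · rw [← hc0] at h1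
        exact hv00 (by simpa using h1)
      · exact hv00 hE.2.2.2.1
    · rintro ⟨h1, _⟩; exact h1

theorem pvScan_eq (n : Nat) (TA TB : List (List Int))
    (h : ∀ i j : Nat, i < n → j < n → (pvVal TA (i : Int) (j : Int) = 1 ↔ pvVal TB (i : Int) (j : Int) = 1)) :
    (!((List.range n).any fun i => (List.range n).any fun j => pvVal TA (i : Int) (j : Int) == 1)) =
    ((List.range n).all fun i => (List.range n).all fun j => pvVal TB (i : Int) (j : Int) != 1) := by
  rw [Bool.eq_iff_iff]
  simp only [Bool.not_eq_true', List.any_eq_false, List.all_eq_true, List.mem_range,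
    bne_iff_ne, ne_eq]
  constructor
  · intro ha i hi j hj hc
    have h2 := ha i hi
    simp only [List.any_eq_true, List.mem_range, beq_iff_eq, not_exists, not_and] at h2
    exact h2 j hj ((h i j hi hj).2 hc)
  · intro hb i hi
    simp only [List.any_eq_true, List.mem_range, beq_iff_eq, not_exists, not_and]
    intro j hj hc
    exact hb i hi j hj ((h i j hi hj).1 hc)

-- ===== VERDICT (by name: the statement is the Claim_ definition above) =====
theorem knights_moves_spec : Claim_equal_knights_moves := by
  intro T _hD hP
  unfold Spec_knights_moves knights_moves knights_moves_alt
  have hA := pvFinal_A T hP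
  have hB := pvFinal_B T hP
  exact pvScan_eq T.length _ _ (fun i j hi hj =>
    (hA ((i : Int), (j : Int)) (by positivity) (by positivity)).trans
      (hB ((i : Int), (j : Int)) (by positivity) (by positivity)).symm)
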